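-- pv_equiv track=rewrite | github.com/joshspeagle/joshspeagle.github.io | scripts/update_publications_unified.py | _calculate_citations_by_year
-- ===== SOURCE A (Python) =====
-- from typing import Dict, List, Optional
--
-- def _calculate_citations_by_year(publications: List[Dict]) -> Dict:
--     """Calculate citations by publication year."""
--     citations_by_year = {}
--
--     for pub in publications:
--         year = pub.get("year")
--         citations = pub.get("citations", 0)
--
--         if year and year >= 2000:  # Filter reasonable years
--             year_str = str(year)
--             citations_by_year[year_str] = (
--                 citations_by_year.get(year_str, 0) + citations
--             )
--
--     return citations_by_year
-- ===== SOURCE B (Python) =====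
-- def _calculate_citations_by_year(publications):
--     """Calculate citations by publication year (filter -> ordered key dedup -> per-key sums)."""
--     pairs = [
--         (str(pub.get("year")), pub.get("citations", 0))
--         for pub in publications
--         if pub.get("year") and pub.get("year") >= 2000
--     ]
--     order = dict.fromkeys(y for y, _ in pairs)
--     return {y: sum(c for yy, c in pairs if yy == y) for y in order}
-- ===== Notes on version B (the rewrite author's own statement) =====
-- stated objective: alternative
-- what changed: Replaces the single-pass dict accumulation by a three-stage pipeline: build a filtered (year-string, citations) pair list, dedup the keys in first-occurrence order, then compute each bucket's total with a per-key scan of the pair list.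
import Mathlib
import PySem

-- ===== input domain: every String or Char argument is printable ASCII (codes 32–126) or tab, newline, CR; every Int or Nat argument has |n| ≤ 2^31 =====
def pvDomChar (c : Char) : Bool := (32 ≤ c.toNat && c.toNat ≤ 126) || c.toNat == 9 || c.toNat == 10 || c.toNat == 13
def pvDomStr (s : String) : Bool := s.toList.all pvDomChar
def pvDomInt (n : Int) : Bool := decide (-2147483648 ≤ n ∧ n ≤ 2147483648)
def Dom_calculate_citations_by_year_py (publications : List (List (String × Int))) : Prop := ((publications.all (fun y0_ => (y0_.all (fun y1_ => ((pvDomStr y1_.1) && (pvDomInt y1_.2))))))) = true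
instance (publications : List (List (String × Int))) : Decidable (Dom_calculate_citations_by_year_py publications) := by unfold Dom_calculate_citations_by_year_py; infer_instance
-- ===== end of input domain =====

-- B replaces A's single-pass dict accumulation by filter → ordered key dedup → per-key sums (alternative decomposition, not faster).


-- ===== PORT A =====
-- the loop body of A: read year / citations, filter `year and year >= 2000`, accumulate into the dict
def pvAStep (d : PySem.Dict String Int) (pub : List (String × Int)) : PySem.Dict String Int :=
  let year := (PySem.Dict.mk pub).get? "year"
  let citations := (PySem.Dict.mk pub).getD "citations" 0
  match year with
  | none => d                                   -- `year` is None: falsy, skip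
  | some y =>
      if y ≠ 0 ∧ 2000 ≤ y then                  -- `year and year >= 2000` (0 is falsy)
        let year_str := PySem.Int.toStr y
        d.insert year_str (d.getD year_str 0 + citations)
      else d

def calculate_citations_by_year_py (publications : List (List (String × Int))) : List (String × Int) :=
  (publications.foldl pvAStep PySem.Dict.empty).items

-- ===== PORT B =====
-- the comprehension filter of Source B: `(str(pub.get("year")), pub.get("citations", 0))` if the guard holds
def pvBPair (pub : List (String × Int)) : Option (String × Int) :=
  match (PySem.Dict.mk pub).get? "year" with
  | none => none
  | some y =>
      if y ≠ 0 ∧ 2000 ≤ y then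
        some (PySem.Int.toStr y, (PySem.Dict.mk pub).getD "citations" 0)
      else none

def calculate_citations_by_year_py_alt (publications : List (List (String × Int))) : List (String × Int) :=
  let pairs := publications.filterMap pvBPair
  let order := PySem.List.dedup (pairs.map Prod.fst)            -- dict.fromkeys(...)
  order.map (fun y => (y, ((pairs.filter (fun p => p.1 == y)).map Prod.snd).sum))

-- ===== PRECONDITION & SPEC =====
def Spec_calculate_citations_by_year_py (publications : List (List (String × Int))) (out : List (String × Int)) : Prop := out = calculate_citations_by_year_py_alt publications
instance (publications : List (List (String × Int))) (out : List (String × Int)) : Decidable (Spec_calculate_citations_by_year_py publications out) := by unfold Spec_calculate_citations_by_year_py; infer_instance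

-- ===== CLAIM (what is proved, stated in full; the proofs are below) =====
def Claim_equal_calculate_citations_by_year_py : Prop := ∀ (publications : List (List (String × Int))), Dom_calculate_citations_by_year_py publications → Spec_calculate_citations_by_year_py publications (calculate_citations_by_year_py publications)

-- ===== LEMMAS AND PROOFS =====

-- A's loop body, applied to one pub, is exactly the pair-accumulation step on B's filtered pair (or a no-op)
def pvStep2 (d : PySem.Dict String Int) (p : String × Int) : PySem.Dict String Int :=
  d.insert p.1 (d.getD p.1 0 + p.2)

theorem pvAStep_eq (d : PySem.Dict String Int) (pub : List (String × Int)) :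
    pvAStep d pub = match pvBPair pub with
                    | none => d
                    | some p => pvStep2 d p := by
  unfold pvAStep pvBPair pvStep2
  cases (PySem.Dict.mk pub).get? "year" with
  | none => rfl
  | some y => by_cases h : y ≠ 0 ∧ 2000 ≤ y <;> simp [h]

theorem pvFoldl_eq (pubs : List (List (String × Int))) (d : PySem.Dict String Int) :
    pubs.foldl pvAStep d = (pubs.filterMap pvBPair).foldl pvStep2 d := by
  induction pubs generalizing d with
  | nil => rfl
  | cons pub rest ih =>
      rw [List.foldl_cons, pvAStep_eq, List.filterMap_cons]
      cases pvBPair pub with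
      | none => exact ih d
      | some p => exact ih (pvStep2 d p)

-- value function of the grouped result
def pvSum (ps : List (String × Int)) (y : String) : Int :=
  ((ps.filter (fun p => p.1 == y)).map Prod.snd).sum

theorem pvMain (ps : List (String × Int)) :
    (ps.foldl pvStep2 PySem.Dict.empty).items =
      (PySem.List.dedup (ps.map Prod.fst)).map (fun y => (y, pvSum ps y)) := by
  induction ps using List.reverseRecOn with
  | nil => rfl
  | append_singleton ps p ih =>
      obtain ⟨k, c⟩ := p
      have hkeys : (ps.foldl pvStep2 PySem.Dict.empty).keys
          = PySem.List.dedup (ps.map Prod.fst) := by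
        simp only [PySem.Dict.keys, ih, List.map_map]
        simp [Function.comp_def]
      have hnodup : (ps.foldl pvStep2 PySem.Dict.empty).keys.Nodup := by
        rw [hkeys, PySem.List.dedup_eq_ofList]; exact PySem.Set.nodup_ofList (ps.map Prod.fst)
      have hsum : ∀ y, pvSum (ps ++ [(k, c)]) y
          = pvSum ps y + (if k == y then c else 0) := by
        intro y
        unfold pvSum
        by_cases h : (k == y) <;> simp [List.filter_append, h]
      rw [List.foldl_append, List.foldl_cons, List.foldl_nil]
      by_cases hmem : k ∈ ps.map Prod.fst
      · -- key already present: insert overwrites in place, dedup unchanged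
        have hcont : (ps.foldl pvStep2 PySem.Dict.empty).contains k = true := by
          rw [PySem.Dict.contains_iff_mem_keys, hkeys]
          simpa using (PySem.Set.mem_ofList (ps.map Prod.fst) k).mpr hmem
        have hgetD : (ps.foldl pvStep2 PySem.Dict.empty).getD k 0 = pvSum ps k := by
          have hin : (k, pvSum ps k) ∈ (ps.foldl pvStep2 PySem.Dict.empty).items := by
            rw [ih]
            exact List.mem_map.mpr ⟨k, by simpa using (PySem.Set.mem_ofList (ps.map Prod.fst) k).mpr hmem, rfl⟩
          exact PySem.Dict.getD_of_mem_items _ hin hnodup 0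
        have hded : PySem.List.dedup ((ps ++ [(k, c)]).map Prod.fst)
            = PySem.List.dedup (ps.map Prod.fst) := by
          rw [List.map_append]
          simp only [List.map_cons, List.map_nil]
          rw [show ((ps.map Prod.fst) ++ [k]) = ps.map Prod.fst ++ [k] from rfl]
          simp only [PySem.List.dedup_eq_ofList, PySem.Set.ofList_append_singleton]
          exact PySem.Set.add_of_mem ((PySem.Set.mem_ofList (ps.map Prod.fst) k).mpr hmem)
        have hstep : pvStep2 (ps.foldl pvStep2 PySem.Dict.empty) (k, c)
            = (ps.foldl pvStep2 PySem.Dict.empty).insert k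
                ((ps.foldl pvStep2 PySem.Dict.empty).getD k 0 + c) := rfl
        rw [hstep]
        rw [PySem.Dict.items_insert_of_contains _ _ hcont, ih, hded, hgetD,
            List.map_map]
        refine List.map_congr_left ?_
        intro y _
        simp only [Function.comp]
        rw [hsum y]
        by_cases hyk : y = k
        · subst hyk; simp
        · have : (k == y) = false := by simpa using Ne.symm hyk
          simp [hyk, this]
      · -- new key: insert appends, dedup gains k at the end
        have hcont : (ps.foldl pvStep2 PySem.Dict.empty).contains k = false := by
          rw [← Bool.not_eq_true, PySem.Dict.contains_iff_mem_keys, hkeys]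
          simpa using fun h => hmem ((PySem.Set.mem_ofList (ps.map Prod.fst) k).mp h)
        have hgetD : (ps.foldl pvStep2 PySem.Dict.empty).getD k 0 = 0 :=
          PySem.Dict.getD_of_not_contains _ 0 hcont
        have hded : PySem.List.dedup ((ps ++ [(k, c)]).map Prod.fst)
            = PySem.List.dedup (ps.map Prod.fst) ++ [k] := by
          rw [List.map_append]
          simp only [List.map_cons, List.map_nil]
          simp only [PySem.List.dedup_eq_ofList, PySem.Set.ofList_append_singleton]
          exact PySem.Set.add_of_not_mem (fun h => hmem ((PySem.Set.mem_ofList (ps.map Prod.fst) k).mp h))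
        have hfilt : pvSum (ps ++ [(k, c)]) k = c := by
          rw [hsum k]
          have : pvSum ps k = 0 := by
            unfold pvSum
            have : ps.filter (fun p => p.1 == k) = [] := by
              rw [List.filter_eq_nil_iff]
              intro p hp hbe
              exact hmem (List.mem_map.mpr ⟨p, hp, by simpa using hbe⟩)
            simp [this]
          simp [this]
        have hstep : pvStep2 (ps.foldl pvStep2 PySem.Dict.empty) (k, c)
            = (ps.foldl pvStep2 PySem.Dict.empty).insert k
                ((ps.foldl pvStep2 PySem.Dict.empty).getD k 0 + c) := rfl
        rw [hstep]
        rw [PySem.Dict.items_insert_of_not_contains _ _ hcont, ih, hded, hgetD,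
            List.map_append]
        congr 1
        · refine List.map_congr_left ?_
          intro y hy
          rw [hsum y]
          have hyk : y ≠ k := fun h =>
            hmem (h ▸ (PySem.Set.mem_ofList (ps.map Prod.fst) y).mp (by simpa using hy))
          have : (k == y) = false := by simpa using Ne.symm hyk
          simp [this]
        · simp [hfilt]

-- ===== VERDICT (by name: the statement is the Claim_ definition above) =====
theorem calculate_citations_by_year_py_spec : Claim_equal_calculate_citations_by_year_py := by
  intro publications _
  unfold Spec_calculate_citations_by_year_py calculate_citations_by_year_py calculate_citations_by_year_py_alt
  rw [pvFoldl_eq, pvMain]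
  rfl
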